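-- pv_equiv track=rewrite | github.com/swazara/bioinformatics-active-learning | bio_utils.py | clean_clump_noise
-- ===== SOURCE A (Python) =====
-- def hamming_distance(s1: str, s2: str) -> int:
--     """
--     Computes the Hamming distance between two strings of equal length.
--
--     Complexity: O(k)
--     """
--     return sum(a != b for a, b in zip(s1, s2))
--
-- def clean_clump_noise(clump_results: list, d: int = 1) -> list:
--     """
--     From a list of clump tuples produced by find_clumps, groups k-mers
--     that are within Hamming distance d of each other and keeps only the
--     best representative (highest exact count, then highest total count).
--
--     Complexity: O(c² · k)  where c = len(clump_results)
--     """
--     remaining = list(clump_results)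
--     result = []
--
--     while remaining:
--         # Take the current best candidate (highest exact count)
--         remaining.sort(key=lambda x: (x[2], x[2] + x[3]), reverse=True)
--         best = remaining.pop(0)
--         result.append(best)
--
--         # Remove all k-mers within Hamming distance d of the best
--         remaining = [
--             entry for entry in remaining
--             if hamming_distance(entry[0], best[0]) > d
--         ]
--
--     return sorted(result, key=lambda x: x[1])
-- ===== SOURCE B (Python) =====
-- def hamming_distance(s1: str, s2: str) -> int:
--     return sum(a != b for a, b in zip(s1, s2))
--
-- def clean_clump_noise(clump_results: list, d: int = 1) -> list:
--     # Sort once (stable, same key as A's repeated sort), then one greedy pass: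
--     # keep an entry only if it is farther than d from every representative kept so far.
--     ordered = sorted(clump_results, key=lambda x: (x[2], x[2] + x[3]), reverse=True)
--     reps = []
--     for entry in ordered:
--         if all(hamming_distance(entry[0], r[0]) > d for r in reps):
--             reps.append(entry)
--     return sorted(reps, key=lambda x: x[1])
-- ===== Notes on version B (the rewrite author's own statement) =====
-- stated objective: simpler
-- what changed: A re-sorts and rebuilds the remaining list on every iteration of a while loop; B sorts once up front with the same key and makes a single greedy pass keeping an entry only if it is farther than d from every representative kept so far.
import Mathlib
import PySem

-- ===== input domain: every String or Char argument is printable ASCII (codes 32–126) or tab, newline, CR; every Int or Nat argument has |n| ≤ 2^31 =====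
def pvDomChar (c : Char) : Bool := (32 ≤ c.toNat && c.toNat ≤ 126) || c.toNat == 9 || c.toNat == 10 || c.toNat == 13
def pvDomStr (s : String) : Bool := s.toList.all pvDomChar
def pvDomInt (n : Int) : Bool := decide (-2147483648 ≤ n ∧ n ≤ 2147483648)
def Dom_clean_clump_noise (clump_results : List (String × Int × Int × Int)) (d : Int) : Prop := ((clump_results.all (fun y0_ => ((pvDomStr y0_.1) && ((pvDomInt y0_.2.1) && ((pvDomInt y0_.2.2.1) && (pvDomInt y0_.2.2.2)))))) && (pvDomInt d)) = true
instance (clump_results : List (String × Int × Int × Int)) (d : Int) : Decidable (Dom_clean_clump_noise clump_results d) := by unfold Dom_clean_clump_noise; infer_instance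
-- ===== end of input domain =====

-- B replaces A's repeated sort-pop-filter while loop by one up-front sort (same key,
-- reverse=True) and a single greedy pass testing each entry against all kept reps; objective: simpler.

-- shared helper (identical in both Python files)
def hamming_distance (s1 s2 : String) : Int :=
  ((s1.toList.zip s2.toList).map (fun p => if p.1 ≠ p.2 then (1 : Int) else 0)).sum

-- ===== PORT A =====
-- the while loop: sort remaining (stable, key (x[2], x[2]+x[3]), reverse), pop best, filter.
-- fuel = initial length of remaining, a totality guard: each iteration pops one element,
-- so the fuel is never exhausted before remaining is empty.
def pvALoop (d : Int) : Nat → List (String × Int × Int × Int) → List (String × Int × Int × Int) →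
    List (String × Int × Int × Int)
  | 0, _, result => result
  | fuel + 1, remaining, result =>
    match PySem.List.sorted2 remaining (fun x => x.2.2.1) (fun x => x.2.2.1 + x.2.2.2) true with
    | [] => result
    | best :: rest =>
        pvALoop d fuel (rest.filter (fun entry => decide (d < hamming_distance entry.1 best.1)))
          (result ++ [best])

def clean_clump_noise (clump_results : List (String × Int × Int × Int)) (d : Int) :
    List (String × Int × Int × Int) :=
  PySem.List.sorted (pvALoop d clump_results.length clump_results []) (fun x => x.2.1)

-- ===== PORT B =====
def clean_clump_noise_alt (clump_results : List (String × Int × Int × Int)) (d : Int) :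
    List (String × Int × Int × Int) :=
  let ordered := PySem.List.sorted2 clump_results (fun x => x.2.2.1) (fun x => x.2.2.1 + x.2.2.2) true
  let reps := ordered.foldl
    (fun reps entry =>
      if reps.all (fun r => decide (d < hamming_distance entry.1 r.1)) then reps ++ [entry]
      else reps) []
  PySem.List.sorted reps (fun x => x.2.1)

-- ===== PRECONDITION & SPEC =====
def Spec_clean_clump_noise (clump_results : List (String × Int × Int × Int)) (d : Int) (out : List (String × Int × Int × Int)) : Prop := out = clean_clump_noise_alt clump_results d
instance (clump_results : List (String × Int × Int × Int)) (d : Int) (out : List (String × Int × Int × Int)) : Decidable (Spec_clean_clump_noise clump_results d out) := by unfold Spec_clean_clump_noise; infer_instance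

-- ===== CLAIM =====
def Claim_equal_clean_clump_noise : Prop := ∀ (clump_results : List (String × Int × Int × Int)) (d : Int), Dom_clean_clump_noise clump_results d → Spec_clean_clump_noise clump_results d (clean_clump_noise clump_results d)

-- ===== LEMMAS AND PROOFS =====

-- the strict "comes earlier under reverse-sort" order on the sort key (x[2], x[2]+x[3])
def pvLt (a b : String × Int × Int × Int) : Bool :=
  decide (a.2.2.1 < b.2.2.1) || (!decide (b.2.2.1 < a.2.2.1) && decide (a.2.2.1 + a.2.2.2 < b.2.2.1 + b.2.2.2))

-- "a may stay before b" in the reverse-sorted list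
def pvP (a b : String × Int × Int × Int) : Prop := pvLt a b = false

def pvBef (a b : String × Int × Int × Int) : Bool := pvLt b a

lemma pvLt_iff (a b : String × Int × Int × Int) : pvLt a b = true ↔
    (a.2.2.1 < b.2.2.1 ∨ (¬ b.2.2.1 < a.2.2.1 ∧ a.2.2.1 + a.2.2.2 < b.2.2.1 + b.2.2.2)) := by
  simp [pvLt]

lemma pvLt_asymm {a b : String × Int × Int × Int} (h : pvLt a b = true) : pvLt b a = false := by
  rw [← Bool.not_eq_true, pvLt_iff]
  rw [pvLt_iff] at h
  omega

lemma pvLt_trans {a b c : String × Int × Int × Int} (h1 : pvLt a b = true) (h2 : pvLt b c = true) :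
    pvLt a c = true := by
  rw [pvLt_iff] at h1 h2 ⊢
  omega

lemma pvInsertBy_pairwise {x : String × Int × Int × Int} {acc : List (String × Int × Int × Int)}
    (h : acc.Pairwise pvP) : (PySem.List.insertBy pvBef x acc).Pairwise pvP := by
  induction acc with
  | nil => simp [PySem.List.insertBy]
  | cons y ys ih =>
    rcases List.pairwise_cons.mp h with ⟨hy, hys⟩
    by_cases hb : pvBef x y = true
    · simp only [PySem.List.insertBy, hb, if_true]
      refine List.pairwise_cons.mpr ⟨?_, h⟩
      intro z hz
      have hb' : pvLt y x = true := hb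
      rcases List.mem_cons.mp hz with rfl | hz
      · exact pvLt_asymm hb'
      · -- pvP y z and pvLt y x = true ⇒ pvP x z
        have hyz := hy z hz
        unfold pvP at hyz ⊢
        by_cases hxz : pvLt x z = true
        · have := pvLt_trans hb' hxz
          rw [this] at hyz; exact absurd hyz (by simp)
        · simpa using hxz
    · simp only [PySem.List.insertBy, hb]
      refine List.pairwise_cons.mpr ⟨?_, ih hys⟩
      intro z hz
      rcases (PySem.List.mem_insertBy pvBef x z ys).mp hz with rfl | hz
      · unfold pvP pvBef at *
        simpa using hb
      · exact hy z hz

def pvSortedD (l : List (String × Int × Int × Int)) : List (String × Int × Int × Int) :=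
  l.foldl (fun acc x => PySem.List.insertBy pvBef x acc) []

lemma pvSorted2_eq_sortedD (l : List (String × Int × Int × Int)) :
    PySem.List.sorted2 l (fun x => x.2.2.1) (fun x => x.2.2.1 + x.2.2.2) true = pvSortedD l := rfl

lemma pvSortedD_pairwise (l : List (String × Int × Int × Int)) :
    (pvSortedD l).Pairwise pvP := by
  suffices h : ∀ (l acc : List (String × Int × Int × Int)), acc.Pairwise pvP →
      (l.foldl (fun acc x => PySem.List.insertBy pvBef x acc) acc).Pairwise pvP by
    exact h l [] (by simp)
  intro l
  induction l with
  | nil => intro acc h; simpa using h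
  | cons x xs ih => intro acc h; exact ih _ (pvInsertBy_pairwise h)

lemma pvSortedD_eq_self {l : List (String × Int × Int × Int)} (h : l.Pairwise pvP) :
    pvSortedD l = l := by
  suffices hgen : ∀ (l acc : List (String × Int × Int × Int)), (acc ++ l).Pairwise pvP →
      l.foldl (fun acc x => PySem.List.insertBy pvBef x acc) acc = acc ++ l by
    simpa using hgen l [] (by simpa using h)
  intro l
  induction l with
  | nil => intro acc h; simp
  | cons x xs ih =>
    intro acc h
    have hins : PySem.List.insertBy pvBef x acc = acc ++ [x] := by
      apply PySem.List.insertBy_of_forall_not_before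
      intro y hy
      have := (List.pairwise_append.mp h).2.2 y hy x (by simp)
      unfold pvP at this
      unfold pvBef
      exact this
    simp only [List.foldl_cons, hins]
    have : (acc ++ [x]) ++ xs = acc ++ x :: xs := by simp
    rw [ih (acc ++ [x]) (by rw [this]; exact h), this]

def pvG (e r : String × Int × Int × Int) (d : Int) : Bool := decide (d < hamming_distance e.1 r.1)

-- the greedy selection on an already-ordered list
def pvGreedy (d : Int) : List (String × Int × Int × Int) → List (String × Int × Int × Int)
  | [] => []
  | x :: xs => x :: pvGreedy d (xs.filter (fun e => pvG e x d))
termination_by l => l.length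
decreasing_by
  simp only [List.length_unattach, List.length_cons]
  exact Nat.lt_succ_of_le (le_trans (List.length_filter_le _ _) (by simp))

lemma pvGreedy_nil (d : Int) : pvGreedy d [] = [] := by rw [pvGreedy.eq_def]

lemma pvGreedy_cons (d : Int) (x : String × Int × Int × Int) (xs : List (String × Int × Int × Int)) :
    pvGreedy d (x :: xs) = x :: pvGreedy d (xs.filter (fun e => pvG e x d)) := by
  rw [pvGreedy.eq_def]

-- A's loop on an already-ordered remaining list is the greedy selection
lemma pvALoop_sorted (d : Int) : ∀ (fuel : Nat) (l res : List (String × Int × Int × Int)),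
    l.length ≤ fuel → l.Pairwise pvP → pvALoop d fuel l res = res ++ pvGreedy d l := by
  intro fuel
  induction fuel with
  | zero =>
    intro l res hn hp
    have : l = [] := List.length_eq_zero_iff.mp (Nat.le_zero.mp hn)
    subst this
    rw [pvGreedy_nil, List.append_nil]
    rfl
  | succ n ih =>
    intro l res hn hp
    match l with
    | [] =>
      rw [pvGreedy_nil, List.append_nil, pvALoop.eq_def]
      simp [pvSorted2_eq_sortedD, pvSortedD]
    | x :: t =>
      have hsort : PySem.List.sorted2 (x :: t) (fun y => y.2.2.1) (fun y => y.2.2.1 + y.2.2.2) true = x :: t := by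
        rw [pvSorted2_eq_sortedD]; exact pvSortedD_eq_self hp
      simp only [pvALoop]
      simp only [hsort]
      have htp : t.Pairwise pvP := (List.pairwise_cons.mp hp).2
      have hfp : (t.filter (fun entry => decide (d < hamming_distance entry.1 x.1))).Pairwise pvP :=
        List.Pairwise.sublist List.filter_sublist htp
      have hlen : (t.filter (fun entry => decide (d < hamming_distance entry.1 x.1))).length ≤ n := by
        have := List.length_filter_le (fun entry => decide (d < hamming_distance entry.1 x.1)) t
        simp only [List.length_cons] at hn
        omega
      rw [ih _ _ hlen hfp, pvGreedy_cons]
      simp only [pvG]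
      simp

lemma pvALoop_eq_greedy (d : Int) (xs : List (String × Int × Int × Int)) :
    pvALoop d xs.length xs [] = pvGreedy d (pvSortedD xs) := by
  match xs with
  | [] =>
    simp [pvALoop, pvSortedD, pvGreedy_nil]
  | a :: as =>
    have hp := pvSortedD_pairwise (a :: as)
    have hperm : (pvSortedD (a :: as)).Perm (a :: as) := by
      rw [← pvSorted2_eq_sortedD]
      exact PySem.List.sorted2_perm ..
    match hs : pvSortedD (a :: as) with
    | [] =>
      rw [hs] at hperm
      exact absurd hperm.symm (by simp)
    | b :: t =>
      simp only [List.length_cons, pvALoop]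
      simp only [pvSorted2_eq_sortedD, hs]
      rw [hs] at hp hperm
      have htp : t.Pairwise pvP := (List.pairwise_cons.mp hp).2
      have hfp : (t.filter (fun entry => decide (d < hamming_distance entry.1 b.1))).Pairwise pvP :=
        List.Pairwise.sublist List.filter_sublist htp
      have hlen : (t.filter (fun entry => decide (d < hamming_distance entry.1 b.1))).length ≤ as.length := by
        have h1 := hperm.length_eq
        have h2 := List.length_filter_le (fun entry => decide (d < hamming_distance entry.1 b.1)) t
        simp only [List.length_cons] at h1
        omega
      rw [pvALoop_sorted d _ _ _ hlen hfp, pvGreedy_cons]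
      simp only [pvG]
      simp

-- B's fold is the greedy selection
lemma pvBSel_eq_greedy (d : Int) : ∀ (l acc : List (String × Int × Int × Int)),
    l.foldl (fun reps entry =>
      if reps.all (fun r => decide (d < hamming_distance entry.1 r.1)) then reps ++ [entry]
      else reps) acc
    = acc ++ pvGreedy d (l.filter (fun e => acc.all (fun r => pvG e r d))) := by
  intro l
  induction l with
  | nil => intro acc; simp [pvGreedy_nil]
  | cons x xs ih =>
    intro acc
    simp only [List.foldl_cons]
    by_cases hx : acc.all (fun r => decide (d < hamming_distance x.1 r.1)) = true
    · rw [if_pos hx, ih]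
      have hfx : acc.all (fun r => pvG x r d) = true := hx
      rw [List.filter_cons, if_pos hfx, pvGreedy_cons]
      have hsplit : xs.filter (fun e => (acc ++ [x]).all (fun r => pvG e r d))
          = (xs.filter (fun e => acc.all (fun r => pvG e r d))).filter (fun e => pvG e x d) := by
        rw [List.filter_filter]
        apply List.filter_congr
        intro e _
        simp [List.all_append, Bool.and_comm]
      rw [hsplit]
      simp
    · rw [if_neg hx, ih]
      have hfx : acc.all (fun r => pvG x r d) = false := by
        simpa [pvG] using hx
      rw [List.filter_cons, hfx]
      simp

-- ===== VERDICT =====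
theorem clean_clump_noise_spec : Claim_equal_clean_clump_noise := by
  intro xs d _
  show PySem.List.sorted (pvALoop d xs.length xs []) (fun x => x.2.1) =
      PySem.List.sorted
        ((PySem.List.sorted2 xs (fun x => x.2.2.1) (fun x => x.2.2.1 + x.2.2.2) true).foldl
          (fun reps entry =>
            if reps.all (fun r => decide (d < hamming_distance entry.1 r.1)) then reps ++ [entry]
            else reps) [])
        (fun x => x.2.1)
  rw [pvALoop_eq_greedy, pvSorted2_eq_sortedD, pvBSel_eq_greedy]
  congr 1
  simp
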